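-- pv_equiv track=rewrite | github.com/apdn7/AnalysisPlatform | ap/common/common_utils.py | add_suffix_for_same_column_name
-- ===== SOURCE A (Python) =====
-- import copy
-- from typing import IO, Any, List, TextIO, Union
--
-- def find_duplicate_values(key_value_dict: dict[Any, str]) -> dict[str, Any]:
--     """Find duplicate values in dictionary
--
--     Args:
--         key_value_dict: dictionary with duplicate values
--
--     Returns:
--         a dictionary with
--
--         - key: duplicate value of input dictionary
--
--         - value: list of keys that contain duplicate values
--     """
--
--     # find duplicate values
--     values = list(key_value_dict.values())
--     duplicate_values = [value for value in values if values.count(value) > 1]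
--
--     # find keys belongs to duplicate values
--     duplicate_value_item = {}
--     for key, value in key_value_dict.items():
--         if value in duplicate_values:
--             duplicate_value_item[value] = (duplicate_value_item.get(value) or []) + [key]
--
--     # sort keys by alphabet
--     for key in duplicate_value_item.keys():
--         duplicate_value_item[key].sort()
--
--     return duplicate_value_item
--
-- def add_suffix_for_same_column_name(key_value_dict: dict[Any, str]):
--     """Add suffix for duplicate names in dictionary
--
--     Args:
--         key_value_dict: dictionary with duplicate names
--
--     Returns:
--         dictionary with unique names (added suffix for duplicate names)
--     """
--
--     output = copy.deepcopy(key_value_dict)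
--     duplicate_value_item = find_duplicate_values(key_value_dict)
--     for duplicate_value, keys in duplicate_value_item.items():
--         suffix_index = 1
--         for key in keys[1:]:  # skip first element in list
--             output[key] = f'{output[key]}_{suffix_index:02}'
--             suffix_index += 1
--
--     return output
-- ===== SOURCE B (Python) =====
-- def add_suffix_for_same_column_name(key_value_dict):
--     """Add suffix for duplicate names in dictionary.
--
--     Per-key rank counting: for each key, the suffix index is the number of
--     smaller keys sharing its value; no intermediate duplicate-groups dict and
--     no sorting.  Return-value equivalent to the original (keys/values are str,
--     so the original's deepcopy is value-identical to rebuilding the dict).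
--     """
--     items = list(key_value_dict.items())
--     output = {}
--     for key, value in items:
--         group = [k for k, v in items if v == value]
--         rank = sum(1 for k in group if k < key)
--         if len(group) > 1 and rank > 0:
--             output[key] = f'{value}_{rank:02}'
--         else:
--             output[key] = value
--     return output
-- ===== Notes on version B (the rewrite author's own statement) =====
-- stated objective: simpler
-- what changed: B computes each key's suffix index directly as the number of smaller keys sharing its value (one comparison-counting pass per key), replacing A's three-stage pipeline of repeated values.count scanning, duplicate-group dict building and per-group sorting plus enumeration; B also builds the result dict in one pass instead of deepcopy-then-mutate (values are str, so the returned mapping is identical).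
import Mathlib
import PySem

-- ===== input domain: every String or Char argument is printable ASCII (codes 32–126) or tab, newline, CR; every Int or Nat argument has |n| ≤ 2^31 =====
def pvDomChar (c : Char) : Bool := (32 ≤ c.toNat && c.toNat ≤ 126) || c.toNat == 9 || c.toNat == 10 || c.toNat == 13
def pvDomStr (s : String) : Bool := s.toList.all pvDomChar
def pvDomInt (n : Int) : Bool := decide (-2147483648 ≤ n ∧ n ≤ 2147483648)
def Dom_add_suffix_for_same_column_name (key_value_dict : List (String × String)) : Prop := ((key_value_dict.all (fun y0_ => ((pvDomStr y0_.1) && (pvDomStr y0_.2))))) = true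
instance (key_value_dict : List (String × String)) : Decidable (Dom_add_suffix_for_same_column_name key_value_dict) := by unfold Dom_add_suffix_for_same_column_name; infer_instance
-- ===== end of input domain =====

-- B computes each key's suffix index as the number of smaller keys sharing its value (one
-- counting pass per key), replacing A's count-scan / group-dict / sort-and-enumerate pipeline;
-- return-value equivalent (values are str, so A's deepcopy is value-identical).

-- shared helper: the f-string fragment f'{n:02}' (= str(n).zfill(2)), used by both sources
def pvFmt2 (n : Int) : String := PySem.Str.zfill (PySem.Int.toStr n) 2

-- ===== PORT A =====
def find_duplicate_values (key_value_dict : List (String × String)) : PySem.Dict String (List String) :=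
  let values := key_value_dict.map (·.2)
  let duplicate_values := values.filter (fun v => PySem.List.count values v > 1)
  let dvi := key_value_dict.foldl (fun (dvi : PySem.Dict String (List String)) kv =>
      if kv.2 ∈ duplicate_values then
        -- `duplicate_value_item.get(value) or []`: a stored value is a nonempty list, so this is get-with-default []
        dvi.insert kv.2 (((dvi.get? kv.2).getD []) ++ [kv.1])
      else dvi) PySem.Dict.empty
  -- the key is taken from dvi.keys, so it is present and modify's default is never used
  dvi.keys.foldl (fun dvi k => dvi.modify k [] (fun l => PySem.List.sorted l (fun x => x) false)) dvi

def add_suffix_for_same_column_name (key_value_dict : List (String × String)) : List (String × String) :=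
  let output := PySem.Dict.mk key_value_dict
  let duplicate_value_item := find_duplicate_values key_value_dict
  (duplicate_value_item.items.foldl (fun (output : PySem.Dict String String) p =>
      -- output[key] exists (keys come from key_value_dict), so getD's default is never used
      ((p.2.drop 1).foldl (fun (st : PySem.Dict String String × Int) k =>
          (st.1.insert k (st.1.getD k "" ++ "_" ++ pvFmt2 st.2), st.2 + 1)) (output, 1)).1)
    output).items

-- ===== PORT B =====
def add_suffix_for_same_column_name_alt (key_value_dict : List (String × String)) : List (String × String) :=
  (key_value_dict.foldl (fun (output : PySem.Dict String String) kv =>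
      let group := (key_value_dict.filter (fun p => p.2 == kv.2)).map (·.1)
      let rank := group.countP (fun k => decide (k < kv.1))
      output.insert kv.1
        (if group.length > 1 ∧ rank > 0 then kv.2 ++ "_" ++ pvFmt2 rank else kv.2))
    PySem.Dict.empty).items

-- ===== PRECONDITION & SPEC =====
-- Pre_ excludes association lists with duplicate keys: a Python dict (the declared argument
-- type) cannot contain a duplicate key, so such lists represent no actual input of A.
def Pre_add_suffix_for_same_column_name (key_value_dict : List (String × String)) : Prop :=
  (key_value_dict.map (·.1)).Nodup
instance (key_value_dict : List (String × String)) : Decidable (Pre_add_suffix_for_same_column_name key_value_dict) := by unfold Pre_add_suffix_for_same_column_name; infer_instance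

def pvWitness_add_suffix_for_same_column_name : (List (String × String)) :=
  [("b", "x"), ("a", "x"), ("c", "y"), ("d", "x")]

def Spec_add_suffix_for_same_column_name (key_value_dict : List (String × String)) (out : List (String × String)) : Prop := out = add_suffix_for_same_column_name_alt key_value_dict
instance (key_value_dict : List (String × String)) (out : List (String × String)) : Decidable (Spec_add_suffix_for_same_column_name key_value_dict out) := by unfold Spec_add_suffix_for_same_column_name; infer_instance

-- ===== CLAIM (what is proved, stated in full; the proofs are below) =====
def Claim_equal_add_suffix_for_same_column_name : Prop := ∀ (key_value_dict : List (String × String)), Dom_add_suffix_for_same_column_name key_value_dict → Pre_add_suffix_for_same_column_name key_value_dict → Spec_add_suffix_for_same_column_name key_value_dict (add_suffix_for_same_column_name key_value_dict)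

-- ===== LEMMAS AND PROOFS =====

-- proof-side vocabulary: per-key group, rank, and the common value function
def pvGKeys (d : List (String × String)) (v : String) : List String :=
  (d.filter (fun p => p.2 == v)).map (·.1)
def pvRank (d : List (String × String)) (kv : String × String) : Nat :=
  (pvGKeys d kv.2).countP (fun k => decide (k < kv.1))
def pvF (d : List (String × String)) (kv : String × String) : String :=
  if (pvGKeys d kv.2).length > 1 ∧ pvRank d kv > 0 then kv.2 ++ "_" ++ pvFmt2 (pvRank d kv) else kv.2
def pvG (d : List (String × String)) (S : List String) (kv : String × String) : String :=
  if kv.2 ∈ S ∧ pvRank d kv > 0 then kv.2 ++ "_" ++ pvFmt2 (pvRank d kv) else kv.2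

lemma gkeys_length (d : List (String × String)) (v : String) :
    (pvGKeys d v).length = PySem.List.count (d.map (·.2)) v := by
  rw [pvGKeys]
  rw [List.length_map, PySem.List.count_eq, List.count, List.countP_map,
    List.countP_eq_length_filter]; rfl

lemma alt_eq_mapF (d : List (String × String)) (hnd : (d.map (·.1)).Nodup) :
    add_suffix_for_same_column_name_alt d = d.map (fun kv => (kv.1, pvF d kv)) := by
  show (List.foldl (fun (output : PySem.Dict String String) kv => output.insert kv.1 (pvF d kv))
      PySem.Dict.empty d).items = d.map (fun kv => (kv.1, pvF d kv))
  rw [PySem.Dict.items_foldl_insert_fresh d (fun kv => kv.1) (fun kv => pvF d kv)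
      PySem.Dict.empty (fun a _ => PySem.Dict.contains_empty a.1) (by simpa using hnd)]
  rfl

lemma fold1_get? (dv : List String) (l : List (String × String))
    (dvi : PySem.Dict String (List String)) (v : String) :
    (l.foldl (fun (dvi : PySem.Dict String (List String)) kv =>
        if kv.2 ∈ dv then dvi.insert kv.2 (((dvi.get? kv.2).getD []) ++ [kv.1]) else dvi) dvi).get? v
      = if v ∈ dv ∧ (l.filter (fun p => p.2 == v)) ≠ [] then
          some ((dvi.get? v).getD [] ++ (l.filter (fun p => p.2 == v)).map (·.1))
        else dvi.get? v := by
  induction l generalizing dvi with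
  | nil => simp
  | cons kv t ih =>
    simp only [List.foldl_cons]
    by_cases hdv : kv.2 ∈ dv
    · simp only [if_pos hdv]
      rw [ih]
      simp only [PySem.Dict.get?_insert, List.filter_cons]
      by_cases hv : v = kv.2
      · subst hv
        simp only [BEq.rfl, if_true, hdv, true_and]
        by_cases ht : (t.filter (fun p => p.2 == kv.2)) = [] <;>
          simp [ht, List.append_assoc]
      · have hne : (kv.2 == v) = false := beq_eq_false_iff_ne.mpr (Ne.symm hv)
        rw [hne]
        simp [hv]
    · simp only [if_neg hdv]
      rw [ih]
      by_cases hv : v = kv.2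
      · subst hv
        simp [hdv]
      · have h : List.filter (fun p => p.2 == v) (kv :: t) = List.filter (fun p => p.2 == v) t := by
          simp [beq_iff_eq, Ne.symm hv]
        rw [h]

lemma fold1_nodup (dv : List String) (l : List (String × String))
    (dvi : PySem.Dict String (List String)) (h : dvi.keys.Nodup) :
    (l.foldl (fun (dvi : PySem.Dict String (List String)) kv =>
        if kv.2 ∈ dv then dvi.insert kv.2 (((dvi.get? kv.2).getD []) ++ [kv.1]) else dvi) dvi).keys.Nodup := by
  induction l generalizing dvi with
  | nil => simpa
  | cons kv t ih =>
    simp only [List.foldl_cons]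
    by_cases hdv : kv.2 ∈ dv
    · simp only [if_pos hdv]
      exact ih _ (PySem.Dict.nodup_keys_insert _ _ _ h)
    · simp only [if_neg hdv]
      exact ih _ h

lemma get?_ite (d : PySem.Dict String (List String)) (k : String) :
    d.get? k = if d.contains k = true then some (d.getD k []) else none := by
  rw [PySem.Dict.contains_eq_isSome_get?, PySem.Dict.getD_eq_get?_getD]
  cases d.get? k <;> simp

lemma fold2_get? (ks : List String) (d0 : PySem.Dict String (List String)) (v : String)
    (hk : ∀ k ∈ ks, d0.contains k = true) :
    (ks.foldl (fun dvi k => dvi.modify k [] (fun l => PySem.List.sorted l (fun x => x) false)) d0).get? v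
      = if v ∈ ks then some (PySem.List.sorted ((d0.get? v).getD []) (fun x => x) false) else d0.get? v := by
  induction ks generalizing d0 with
  | nil => simp
  | cons k t ih =>
    simp only [List.foldl_cons]
    have hcont : ∀ k' ∈ t, (d0.modify k [] (fun l => PySem.List.sorted l (fun x => x) false)).contains k' = true := by
      intro k' hk'
      rw [PySem.Dict.contains_modify]
      simp [hk k' (List.mem_cons_of_mem _ hk')]
    rw [ih _ hcont]
    have hget : ∀ v', (d0.modify k [] (fun l => PySem.List.sorted l (fun x => x) false)).get? v'
        = if v' = k then some (PySem.List.sorted ((d0.get? k).getD []) (fun x => x) false) else d0.get? v' := by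
      intro v'
      rw [get?_ite, PySem.Dict.contains_modify, PySem.Dict.getD_modify]
      by_cases hv : v' = k
      · simp [hv, hk k (List.mem_cons_self), PySem.Dict.getD_eq_get?_getD]
      · rw [get?_ite d0 v']
        simp [hv]
    by_cases hvt : v ∈ t
    · simp only [if_pos hvt, if_pos (List.mem_cons_of_mem _ hvt)]
      rw [hget v]
      by_cases hv : v = k
      · simp [hv, PySem.List.sorted_sorted]
      · simp [hv]
    · simp only [if_neg hvt]
      rw [hget v]
      by_cases hv : v = k <;> simp [hv, hvt]

lemma fold2_keys (ks : List String) (d0 : PySem.Dict String (List String))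
    (hk : ∀ k ∈ ks, d0.contains k = true) :
    (ks.foldl (fun dvi k => dvi.modify k [] (fun l => PySem.List.sorted l (fun x => x) false)) d0).keys = d0.keys := by
  induction ks generalizing d0 with
  | nil => simp
  | cons k t ih =>
    simp only [List.foldl_cons]
    have hcont : ∀ k' ∈ t, (d0.modify k [] (fun l => PySem.List.sorted l (fun x => x) false)).contains k' = true := by
      intro k' hk'
      rw [PySem.Dict.contains_modify]
      simp [hk k' (List.mem_cons_of_mem _ hk')]
    rw [ih _ hcont, PySem.Dict.keys_modify, PySem.Dict.keys_insert_of_contains _ _ (hk k List.mem_cons_self)]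

lemma dvi1_get? (d : List (String × String)) (v : String) :
    (d.foldl (fun (dvi : PySem.Dict String (List String)) kv =>
        if kv.2 ∈ (d.map (·.2)).filter (fun v => PySem.List.count (d.map (·.2)) v > 1) then
          dvi.insert kv.2 (((dvi.get? kv.2).getD []) ++ [kv.1]) else dvi) PySem.Dict.empty).get? v
      = if PySem.List.count (d.map (·.2)) v > 1 ∧ v ∈ d.map (·.2) then some (pvGKeys d v) else none := by
  rw [fold1_get?]
  have h1 : (v ∈ (d.map (·.2)).filter (fun v => PySem.List.count (d.map (·.2)) v > 1))
      ↔ (PySem.List.count (d.map (·.2)) v > 1 ∧ v ∈ d.map (·.2)) := by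
    simp [List.mem_filter, and_comm]
  have h2 : ((d.filter (fun p => p.2 == v)) ≠ []) ↔ v ∈ d.map (·.2) := by
    simp only [ne_eq, List.filter_eq_nil_iff, List.mem_map, not_forall]
    constructor
    · rintro ⟨p, hp, hv⟩
      exact ⟨p, hp, by simpa using hv⟩
    · rintro ⟨p, hp, hv⟩
      exact ⟨p, hp, by simp [hv]⟩
  by_cases hc : PySem.List.count (d.map (·.2)) v > 1 ∧ v ∈ d.map (·.2)
  · rw [if_pos ⟨h1.2 hc, h2.2 hc.2⟩, if_pos hc]
    simp [pvGKeys, PySem.Dict.get?_empty]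
  · rw [if_neg, if_neg hc]
    · simp [PySem.Dict.get?_empty]
    · rintro ⟨hm, hf⟩
      have hcnt := (List.mem_filter.1 hm).2
      exact hc ⟨by simpa using hcnt, h2.1 hf⟩

lemma fdv_get? (d : List (String × String)) (v : String) :
    (find_duplicate_values d).get? v
      = if PySem.List.count (d.map (·.2)) v > 1 ∧ v ∈ d.map (·.2) then
          some (PySem.List.sorted (pvGKeys d v) (fun x => x) false)
        else none := by
  unfold find_duplicate_values
  rw [fold2_get?]
  · by_cases hv : v ∈ (d.foldl (fun (dvi : PySem.Dict String (List String)) kv =>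
        if kv.2 ∈ (d.map (·.2)).filter (fun v => PySem.List.count (d.map (·.2)) v > 1) then
          dvi.insert kv.2 (((dvi.get? kv.2).getD []) ++ [kv.1]) else dvi) PySem.Dict.empty).keys
    · rw [if_pos hv, dvi1_get?]
      have hc : PySem.List.count (d.map (·.2)) v > 1 ∧ v ∈ d.map (·.2) := by
        have := (PySem.Dict.contains_iff_mem_keys _ v).2 hv
        rw [PySem.Dict.contains_eq_isSome_get?, dvi1_get?] at this
        by_contra hc
        rw [if_neg hc] at this
        simp at this
      rw [if_pos hc, if_pos hc]
      simp
    · rw [if_neg hv, dvi1_get?, if_neg, if_neg]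
      all_goals
        intro hc
        apply hv
        rw [← PySem.Dict.contains_iff_mem_keys, PySem.Dict.contains_eq_isSome_get?, dvi1_get?, if_pos hc]
        simp
  · intro k hk
    rw [PySem.Dict.contains_iff_mem_keys]; exact hk

lemma fdv_nodup (d : List (String × String)) : (find_duplicate_values d).keys.Nodup := by
  unfold find_duplicate_values
  rw [fold2_keys]
  · exact fold1_nodup _ _ _ PySem.Dict.nodup_keys_empty
  · intro k hk
    rw [PySem.Dict.contains_iff_mem_keys]; exact hk

lemma mem_gkeys (d : List (String × String)) (k v : String) : k ∈ pvGKeys d v ↔ (k, v) ∈ d := by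
  simp only [pvGKeys, List.mem_map, List.mem_filter]
  constructor
  · rintro ⟨p, ⟨hp, hv⟩, rfl⟩
    have : p.2 = v := by simpa using hv
    exact this ▸ hp
  · intro h
    exact ⟨(k, v), ⟨h, by simp⟩, rfl⟩

lemma gkeys_nodup (d : List (String × String)) (hnd : (d.map (·.1)).Nodup) (v : String) :
    (pvGKeys d v).Nodup := by
  exact hnd.sublist (List.Sublist.map _ List.filter_sublist)

lemma key_unique (d : List (String × String)) (hnd : (d.map (·.1)).Nodup) {k a b : String}
    (ha : (k, a) ∈ d) (hb : (k, b) ∈ d) : a = b := by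
  induction d with
  | nil => cases ha
  | cons p t ih =>
    simp only [List.map_cons, List.nodup_cons] at hnd
    rcases List.mem_cons.1 ha with rfl | ha' <;> rcases List.mem_cons.1 hb with h | hb'
    · cases h; rfl
    · exact absurd (List.mem_map.2 ⟨_, hb', rfl⟩) hnd.1
    · cases h; exact absurd (List.mem_map.2 ⟨_, ha', rfl⟩) hnd.1
    · exact ih hnd.2 ha' hb'

lemma rank_of_sorted' (ks pre suf : List String) (k : String) (h : ks.Pairwise (· < ·))
    (hks : ks = pre ++ k :: suf) : ks.countP (fun x => decide (x < k)) = pre.length := by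
  subst hks
  rw [List.countP_append, List.countP_cons]
  rw [List.pairwise_append] at h
  have h1 : pre.countP (fun x => decide (x < k)) = pre.length :=
    List.countP_eq_length.2 fun x hx => by simpa using h.2.2 x hx k List.mem_cons_self
  have hk : (decide (k < k) : Bool) = false := by simp
  have h2 : suf.countP (fun x => decide (x < k)) = 0 :=
    List.countP_eq_zero.2 fun x hx => by
      simpa using not_lt_of_gt (List.pairwise_cons.1 h.2.1 |>.1 x hx)
  rw [h1, h2, hk]
  simp

lemma group_fold (d : List (String × String)) (hnd : (d.map (·.1)).Nodup)
    (S : List String) (v : String) (hvS : v ∉ S)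
    (ks : List String) (hperm : ks.Perm (pvGKeys d v)) (hsort : ks.Pairwise (· < ·))
    (cur : PySem.Dict String String)
    (hcur : cur.items = d.map (fun p => (p.1, pvG d S p))) :
    (((ks.drop 1).foldl (fun (st : PySem.Dict String String × Int) k =>
        (st.1.insert k (st.1.getD k "" ++ "_" ++ pvFmt2 st.2), st.2 + 1)) (cur, 1)).1).items
      = d.map (fun p => (p.1, pvG d (S ++ [v]) p)) := by
  have hknd : ks.Nodup := hsort.imp ne_of_lt
  -- values of group members
  have hmem : ∀ k ∈ ks, (k, v) ∈ d := fun k hk => (mem_gkeys d k v).1 (hperm.subset hk)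
  have hrank : ∀ (pre suf : List String) (k : String), ks = pre ++ k :: suf →
      pvRank d (k, v) = pre.length := by
    intro pre suf k hks
    have := rank_of_sorted' ks pre suf k hsort hks
    rw [pvRank, ← hperm.countP_eq]
    exact this
  cases hks0 : ks with
  | nil =>
    -- empty group: no key has value v, so nothing changes
    simp only [List.drop, List.foldl_nil]
    rw [hcur]
    apply List.map_congr_left
    intro p hp
    have hpv : p.2 ≠ v := by
      intro hv
      have : p.1 ∈ pvGKeys d p.2 := (mem_gkeys d p.1 p.2).2 hp
      rw [hv] at this
      rw [← hperm.mem_iff] at this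
      simp [hks0] at this
    simp only [pvG, List.mem_append, List.mem_singleton]
    by_cases hS : p.2 ∈ S
    · simp [hS]
    · simp [hS, hpv]
  | cons k0 rest =>
    -- main invariant over the suffix of processed keys
    subst hks0
    have main : ∀ (todo done : List String) (cur : PySem.Dict String String),
        k0 :: rest = k0 :: (done ++ todo) →
        cur.items = d.map (fun p => (p.1,
          if p.2 = v ∧ p.1 ∈ done then p.2 ++ "_" ++ pvFmt2 (pvRank d p) else pvG d S p)) →
        ((todo.foldl (fun (st : PySem.Dict String String × Int) k =>
            (st.1.insert k (st.1.getD k "" ++ "_" ++ pvFmt2 st.2), st.2 + 1))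
            (cur, 1 + (done.length : Int))).1).items
          = d.map (fun p => (p.1,
              if p.2 = v ∧ p.1 ∈ done ++ todo then p.2 ++ "_" ++ pvFmt2 (pvRank d p) else pvG d S p)) := by
      intro todo
      induction todo with
      | nil =>
        intro done cur hks hc
        simpa using hc
      | cons k todo' ih =>
        intro done cur hks hc
        simp only [List.foldl_cons]
        -- facts about k
        have hkd : (k, v) ∈ d := hmem k (by
          rw [hks]
          exact List.mem_cons_of_mem _ (List.mem_append_right _ List.mem_cons_self))
        have hkdone : k ∉ done ∧ k ≠ k0 ∧ k ∉ todo' := by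
          have h1 : (k0 :: (done ++ k :: todo')).Nodup := hks ▸ hknd
          rcases List.nodup_cons.1 h1 with ⟨hk0, h2⟩
          rcases List.nodup_append.1 h2 with ⟨hd, hkt, hdisj⟩
          refine ⟨fun hk' => ?_, fun he => ?_, (List.nodup_cons.1 hkt).1⟩
          · exact hdisj k hk' k List.mem_cons_self rfl
          · rw [← he] at hk0
            exact hk0 (List.mem_append_right _ List.mem_cons_self)
        -- keys of cur
        have hkeys : cur.keys = d.map (·.1) := by
          show cur.items.map (·.1) = d.map (·.1)
          rw [hc, List.map_map]
          rfl
        have hknodup : cur.keys.Nodup := by rw [hkeys]; exact hnd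
        -- current value at k is v
        have hitem : (k, v) ∈ cur.items := by
          rw [hc]
          refine List.mem_map.2 ⟨(k, v), hkd, ?_⟩
          simp only
          rw [if_neg, pvG, if_neg]
          · rintro ⟨hS, -⟩
            exact hvS hS
          · rintro ⟨-, hdone⟩
            exact hkdone.1 hdone
        have hgetD : cur.getD k "" = v := PySem.Dict.getD_of_mem_items cur hitem hknodup ""
        -- rank of k
        have hrk : pvRank d (k, v) = done.length + 1 := by
          have := hrank (k0 :: done) todo' k (by rw [hks]; simp)
          simpa using this
        -- the insert
        have hcont : cur.contains k = true := by
          rw [PySem.Dict.contains_iff_mem_keys, hkeys]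
          exact List.mem_map.2 ⟨(k, v), hkd, rfl⟩
        have hlen : (1 + (done.length : Int) + 1) = 1 + (((done ++ [k]).length : Int)) := by
          simp; ring
        rw [hlen, ih (done ++ [k]) _ (by rw [hks]; simp)]
        · apply List.map_congr_left
          intro p hp
          have : (p.1 ∈ (done ++ [k]) ++ todo') ↔ (p.1 ∈ done ++ k :: todo') := by
            simp
          by_cases hcnd : p.2 = v ∧ p.1 ∈ done ++ k :: todo'
          · rw [if_pos hcnd, if_pos ⟨hcnd.1, this.2 hcnd.2⟩]
          · rw [if_neg hcnd, if_neg (fun h => hcnd ⟨h.1, this.1 h.2⟩)]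
        · rw [PySem.Dict.items_insert_of_contains _ _ hcont, hc, List.map_map]
          apply List.map_congr_left
          intro p hp
          simp only [Function.comp_apply]
          by_cases hpk : p.1 = k
          · have hpv : p.2 = v := key_unique d hnd (hpk ▸ hp) hkd
            have hbeq : (p.1 == k) = true := by simp [hpk]
            have hrkp : pvRank d p = done.length + 1 := by
              have he : pvRank d p = pvRank d (k, v) := by
                rw [show p = (p.1, p.2) from rfl, hpk, hpv]
              rw [he, hrk]
            simp only [hbeq, if_true]
            rw [hgetD, if_pos ⟨hpv, by simp [hpk]⟩, hrkp, hpk, hpv]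
            have hcast : (1 + (done.length : Int)) = (((done.length + 1 : Nat)) : Int) := by
              push_cast; ring
            rw [hcast]
          · have hbeq : (p.1 == k) = false := by simp [hpk]
            simp only [hbeq, Bool.false_eq_true, if_false]
            congr 1
            by_cases hcond : p.2 = v ∧ p.1 ∈ done
            · rw [if_pos hcond, if_pos ⟨hcond.1, by simp [hcond.2]⟩]
            · rw [if_neg hcond, if_neg]
              rintro ⟨hpv, hmem'⟩
              rcases List.mem_append.1 hmem' with h | h
              · exact hcond ⟨hpv, h⟩
              · exact hpk (by simpa using h)
    have := main rest [] cur (by simp) (by simpa [pvG] using hcur)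
    simp only [List.nil_append] at this
    norm_num at this
    rw [List.drop_one, List.tail_cons, this]
    apply List.map_congr_left
    intro p hp
    by_cases hpv : p.2 = v
    · subst hpv
      have hpks : p.1 ∈ k0 :: rest := hperm.mem_iff.2 ((mem_gkeys d p.1 p.2).2 hp)
      by_cases hp0 : p.1 = k0
      · -- first element: rank 0, no suffix
        have hr0 : pvRank d p = 0 := by
          have h := hrank [] rest k0 rfl
          have hp' : pvRank d p = pvRank d (k0, p.2) := by
            rw [show p = (p.1, p.2) from rfl, hp0]
          rw [hp', h]
          rfl
        have hk0rest : p.1 ∉ rest := by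
          rw [hp0]
          have := hknd
          simp only [List.nodup_cons] at this
          exact this.1
        rw [if_neg (fun h => hk0rest h.2)]
        simp [pvG, hr0]
      · have hrest : p.1 ∈ rest := by
          rcases List.mem_cons.1 hpks with h | h
          · exact absurd h hp0
          · exact h
        have hrpos : pvRank d p > 0 := by
          obtain ⟨pre, suf, hsplit⟩ : ∃ pre suf, rest = pre ++ p.1 :: suf :=
            List.append_of_mem hrest
          have h := hrank (k0 :: pre) suf p.1 (by rw [hsplit]; simp)
          have hp' : pvRank d p = pvRank d (p.1, p.2) := rfl
          rw [hp', h]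
          simp
        rw [if_pos ⟨rfl, hrest⟩, pvG, if_pos ⟨by simp, hrpos⟩]
    · rw [if_neg (fun h => hpv h.1)]
      simp only [pvG, List.mem_append, List.mem_singleton]
      by_cases hS : p.2 ∈ S
      · simp [hS]
      · simp [hS, hpv]

lemma outer_fold (d : List (String × String)) (hnd : (d.map (·.1)).Nodup)
    (gs : List (String × List String)) (S : List String)
    (hdisj : ∀ p ∈ gs, p.1 ∉ S) (hgnd : (gs.map (·.1)).Nodup)
    (hgs : ∀ p ∈ gs, p.2 = PySem.List.sorted (pvGKeys d p.1) (fun x => x) false)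
    (cur : PySem.Dict String String)
    (hcur : cur.items = d.map (fun p => (p.1, pvG d S p))) :
    (gs.foldl (fun (output : PySem.Dict String String) p =>
        ((p.2.drop 1).foldl (fun (st : PySem.Dict String String × Int) k =>
            (st.1.insert k (st.1.getD k "" ++ "_" ++ pvFmt2 st.2), st.2 + 1)) (output, 1)).1)
      cur).items = d.map (fun p => (p.1, pvG d (S ++ gs.map (·.1)) p)) := by
  induction gs generalizing S cur with
  | nil => simpa using hcur
  | cons g gs' ih =>
    simp only [List.foldl_cons]
    have hsorted : g.2 = PySem.List.sorted (pvGKeys d g.1) (fun x => x) false :=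
      hgs g List.mem_cons_self
    have hperm : g.2.Perm (pvGKeys d g.1) := hsorted ▸ PySem.List.sorted_perm _ _ _
    have hsort : g.2.Pairwise (· < ·) := by
      rw [hsorted]
      have hle : (PySem.List.sorted (pvGKeys d g.1) (fun x => x) false).Pairwise (· ≤ ·) :=
        PySem.List.sorted_pairwise _ _
      have hnd2 : (PySem.List.sorted (pvGKeys d g.1) (fun x => x) false).Nodup :=
        ((PySem.List.sorted_perm _ _ _).nodup_iff).2 (gkeys_nodup d hnd g.1)
      exact (hle.and hnd2).imp (fun h => lt_of_le_of_ne h.1 h.2)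
    have hstep := group_fold d hnd S g.1 (hdisj g List.mem_cons_self) g.2 hperm hsort cur hcur
    have := ih (S ++ [g.1])
      (fun p hp => by
        intro hmem
        rcases List.mem_append.1 hmem with h | h
        · exact hdisj p (List.mem_cons_of_mem _ hp) h
        · have : p.1 = g.1 := by simpa using h
          have := hgnd
          simp only [List.map_cons, List.nodup_cons] at this
          exact this.1 (‹p.1 = g.1› ▸ List.mem_map.2 ⟨p, hp, rfl⟩))
      (by
        have := hgnd
        simp only [List.map_cons, List.nodup_cons] at this
        exact this.2)
      (fun p hp => hgs p (List.mem_cons_of_mem _ hp))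
      _ hstep
    rw [this, List.append_assoc]
    rfl

-- ===== VERDICT (by name: the statement is the Claim_ definition above) =====
theorem add_suffix_for_same_column_name_spec : Claim_equal_add_suffix_for_same_column_name := by
  intro d _hdom hnd
  show add_suffix_for_same_column_name d = add_suffix_for_same_column_name_alt d
  have hkeys_mem : ∀ v, v ∈ (find_duplicate_values d).keys
      ↔ (PySem.List.count (d.map (·.2)) v > 1 ∧ v ∈ d.map (·.2)) := by
    intro v
    rw [← PySem.Dict.contains_iff_mem_keys, PySem.Dict.contains_eq_isSome_get?, fdv_get?]
    by_cases hc : PySem.List.count (d.map (·.2)) v > 1 ∧ v ∈ d.map (·.2)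
    · simp [hc]
    · rw [if_neg hc]
      simp only [PySem.List.count_eq, gt_iff_lt, List.mem_map, not_and] at hc
      simp only [Option.isSome_none, PySem.List.count_eq, gt_iff_lt, List.mem_map]
      exact iff_of_false (by simp) (fun h => hc h.1 h.2)
  have hgs : ∀ p ∈ (find_duplicate_values d).items,
      p.2 = PySem.List.sorted (pvGKeys d p.1) (fun x => x) false := by
    intro p hp
    have hg : (find_duplicate_values d).get? p.1 = some p.2 := by
      rcases p with ⟨a, b⟩
      exact (PySem.Dict.get?_eq_some_iff_mem_items _ _ _ (fdv_nodup d)).2 hp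
    rw [fdv_get?] at hg
    by_cases hc : PySem.List.count (d.map (·.2)) p.1 > 1 ∧ p.1 ∈ d.map (·.2)
    · rw [if_pos hc] at hg
      exact (Option.some_inj.1 hg).symm
    · rw [if_neg hc] at hg
      cases hg
  have hcur : (PySem.Dict.mk d).items = d.map (fun p => (p.1, pvG d [] p)) := by
    show d = _
    have : ∀ p ∈ d, (p.1, pvG d [] p) = p := by
      intro p hp
      simp [pvG]
    rw [List.map_congr_left this, List.map_id']
  have hres := outer_fold d hnd (find_duplicate_values d).items [] (by simp)
    (fdv_nodup d) hgs (PySem.Dict.mk d) hcur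
  show (((find_duplicate_values d).items.foldl _ (PySem.Dict.mk d)).items) = _
  rw [hres, alt_eq_mapF d hnd]
  apply List.map_congr_left
  intro p hp
  have hval : p.2 ∈ d.map (·.2) := List.mem_map.2 ⟨p, hp, rfl⟩
  have hiff : (p.2 ∈ [] ++ (find_duplicate_values d).items.map (·.1))
      ↔ ((pvGKeys d p.2).length > 1) := by
    rw [List.nil_append]
    have : ((find_duplicate_values d).items.map (·.1)) = (find_duplicate_values d).keys := rfl
    rw [this, hkeys_mem, gkeys_length]
    simp [hval]
  simp only [pvG, pvF]
  by_cases hc : (pvGKeys d p.2).length > 1 ∧ pvRank d p > 0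
  · rw [if_pos ⟨hiff.2 hc.1, hc.2⟩, if_pos hc]
  · rw [if_neg (fun h => hc ⟨hiff.1 h.1, h.2⟩), if_neg hc]
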